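-- pv_equiv track=rewrite | github.com/stradivari96/advent-of-code | 2023/day06/main.py | _parse_ints
-- ===== SOURCE A (Python) =====
-- def _parse_ints(line: str):
--     line = line.split(":")[1]
--     result = []
--     i = 0
--     n = ""
--     while i < len(line):
--         if line[i].isdigit():
--             n += line[i]
--         elif n:
--             result.append(int(n))
--             n = ""
--         i += 1
--     if n:
--         result.append(int(n))
--     return result
-- ===== SOURCE B (Python) =====
-- def _parse_ints(line: str):
--     after = line.split(":")[1]
--     result = []
--     i = 0
--     while i < len(after):
--         if after[i].isdigit():
--             j = i + 1
--             while j < len(after) and after[j].isdigit():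
--                 j += 1
--             result.append(int(after[i:j]))
--             i = j
--         else:
--             i += 1
--     return result
-- ===== Notes on version B (the rewrite author's own statement) =====
-- stated objective: alternative
-- what changed: B locates each maximal digit run with an inner two-pointer scan and converts the slice in one step, instead of A's character-by-character string accumulator with a separate post-loop flush.
import Mathlib
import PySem

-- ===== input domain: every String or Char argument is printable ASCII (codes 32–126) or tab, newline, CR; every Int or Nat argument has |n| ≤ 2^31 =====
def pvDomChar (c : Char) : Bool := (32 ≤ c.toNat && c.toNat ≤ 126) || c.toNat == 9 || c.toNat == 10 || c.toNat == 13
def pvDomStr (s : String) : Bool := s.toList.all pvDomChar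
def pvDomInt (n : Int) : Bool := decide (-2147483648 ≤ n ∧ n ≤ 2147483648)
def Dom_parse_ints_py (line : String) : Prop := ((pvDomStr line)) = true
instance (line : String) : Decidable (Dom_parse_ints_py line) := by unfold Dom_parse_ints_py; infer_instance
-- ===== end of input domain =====

-- B replaces A's character-by-character accumulator + post-loop flush with a two-pointer
-- scan that slices each maximal digit run whole; equivalence of return values is proved
-- on every line containing a colon separator (elsewhere both raise IndexError).

-- int(n) for a nonempty digit run n (ofChars? is `int(s)`; the run is nonempty digits, so it is `some`)
def pyIntOfDigits (cs : List Char) : Int := (PySem.Int.ofChars? cs).getD 0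

-- ===== PORT A =====
-- the while loop: state (result, n), one step per character, trailing flush at the end
def pvLoopA : List Char → List Int → List Char → List Int
  | [], result, n => if n ≠ [] then result ++ [pyIntOfDigits n] else result
  | c :: rest, result, n =>
    if PySem.Chars.isdigit c then pvLoopA rest result (n ++ [c])
    else if n ≠ [] then pvLoopA rest (result ++ [pyIntOfDigits n]) []
    else pvLoopA rest result n

def parse_ints_py (line : String) : List Int :=
  match PySem.List.pyGet? ((PySem.Str.split? line ":").getD []) 1 with
  | none => []   -- IndexError: excluded by Pre_parse_ints_py
  | some rest => pvLoopA rest.toList [] []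

-- ===== PORT B =====
-- outer loop: skip a non-digit, or take the whole maximal digit run (inner j-scan =
-- takeWhile / dropWhile) and convert the slice in one step
def pvRunScan : List Char → List Int
  | [] => []
  | c :: rest =>
    if PySem.Chars.isdigit c then
      pyIntOfDigits (c :: rest.takeWhile PySem.Chars.isdigit)
        :: pvRunScan (rest.dropWhile PySem.Chars.isdigit)
    else pvRunScan rest
  termination_by cs => cs.length
  decreasing_by
  · exact Nat.lt_succ_of_le (List.length_dropWhile_le _ _)
  · simp

def parse_ints_py_alt (line : String) : List Int :=
  match PySem.List.pyGet? ((PySem.Str.split? line ":").getD []) 1 with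
  | none => []   -- IndexError, as in A
  | some rest => pvRunScan rest.toList

-- ===== PRECONDITION & SPEC =====
-- A (and B) raise IndexError on the split-and-index prologue when the line has no colon separator;
-- Pre_ admits exactly the lines on which the split yields a second piece.
def Pre_parse_ints_py (line : String) : Prop :=
  2 ≤ ((PySem.Str.split? line ":").getD []).length
instance (line : String) : Decidable (Pre_parse_ints_py line) := by
  unfold Pre_parse_ints_py; infer_instance

def pvWitness_parse_ints_py : String := "Time:  7 15  30"

def Spec_parse_ints_py (line : String) (out : List Int) : Prop := out = parse_ints_py_alt line
instance (line : String) (out : List Int) : Decidable (Spec_parse_ints_py line out) := by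
  unfold Spec_parse_ints_py; infer_instance

-- ===== CLAIM (what is proved, stated in full; the proofs are below) =====
def Claim_equal_parse_ints_py : Prop := ∀ (line : String), Dom_parse_ints_py line → Pre_parse_ints_py line → Spec_parse_ints_py line (parse_ints_py line)

-- ===== LEMMAS AND PROOFS =====

theorem takeWhile_all_append {p : Char → Bool} {n : List Char} (h : ∀ c ∈ n, p c = true)
    (l : List Char) : (n ++ l).takeWhile p = n ++ l.takeWhile p := by
  induction n with
  | nil => simp
  | cons d n' ih =>
    simp only [List.cons_append, List.takeWhile_cons, h d (by simp)]
    simp [ih (fun c hc => h c (by simp [hc]))]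

theorem dropWhile_all_append {p : Char → Bool} {n : List Char} (h : ∀ c ∈ n, p c = true)
    (l : List Char) : (n ++ l).dropWhile p = l.dropWhile p := by
  induction n with
  | nil => simp
  | cons d n' ih =>
    simp only [List.cons_append, List.dropWhile_cons, h d (by simp)]
    exact ih (fun c hc => h c (by simp [hc]))

-- the loop invariant: with an all-digit pending run n, A's loop over cs produces
-- result ++ B's run-scan of (n ++ cs)
theorem pvLoopA_eq_runScan (cs : List Char) :
    ∀ (result : List Int) (n : List Char), (∀ c ∈ n, PySem.Chars.isdigit c = true) →
      pvLoopA cs result n = result ++ pvRunScan (n ++ cs) := by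
  induction cs with
  | nil =>
    intro result n hn
    cases n with
    | nil => simp [pvLoopA, pvRunScan]
    | cons d n' =>
      have hd : PySem.Chars.isdigit d = true := hn d (by simp)
      have hn' : ∀ c ∈ n', PySem.Chars.isdigit c = true := fun c hc => hn c (by simp [hc])
      simp [pvLoopA, pvRunScan, hd, List.takeWhile_eq_self_iff.mpr hn',
        List.dropWhile_eq_nil_iff.mpr (fun c hc => hn' c hc), pvRunScan]
  | cons c rest ih =>
    intro result n hn
    by_cases hc : PySem.Chars.isdigit c = true
    · have : pvLoopA (c :: rest) result n = pvLoopA rest result (n ++ [c]) := by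
        simp [pvLoopA, hc]
      rw [this, ih result (n ++ [c]) (fun x hx => by
        rcases List.mem_append.mp hx with h | h
        · exact hn x h
        · simp at h; simpa [h] using hc)]
      simp
    · have hcb : PySem.Chars.isdigit c = false := by simpa using hc
      cases n with
      | nil =>
        have : pvLoopA (c :: rest) result [] = pvLoopA rest result [] := by
          simp [pvLoopA, hcb]
        rw [this, ih result [] (by simp)]
        simp [pvRunScan, hcb]
      | cons d n' =>
        have hd : PySem.Chars.isdigit d = true := hn d (by simp)
        have hn' : ∀ x ∈ n', PySem.Chars.isdigit x = true := fun x hx => hn x (by simp [hx])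
        have : pvLoopA (c :: rest) result (d :: n') =
            pvLoopA rest (result ++ [pyIntOfDigits (d :: n')]) [] := by
          simp [pvLoopA, hcb]
        rw [this, ih _ [] (by simp)]
        have htake : (n' ++ c :: rest).takeWhile PySem.Chars.isdigit = n' := by
          rw [takeWhile_all_append hn']; simp [hcb]
        have hdrop : (n' ++ c :: rest).dropWhile PySem.Chars.isdigit = c :: rest := by
          rw [dropWhile_all_append hn']; simp [hcb]
        conv_rhs => rw [show (d :: n') ++ c :: rest = d :: (n' ++ c :: rest) by simp]
        simp [pvRunScan, hd, htake, hdrop, hcb]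

-- ===== VERDICT (by name: the statement is the Claim_ definition above) =====
theorem parse_ints_py_spec : Claim_equal_parse_ints_py := by
  intro line _ hpre
  unfold Spec_parse_ints_py parse_ints_py parse_ints_py_alt
  unfold Pre_parse_ints_py at hpre
  set parts := (PySem.Str.split? line ":").getD [] with hparts
  have h1 : (1 : Nat) < parts.length := hpre
  have : PySem.List.pyGet? parts (1 : Int) = some parts[1] := by
    rw [show ((1 : Int)) = ((1 : Nat) : Int) by norm_num, PySem.List.pyGet?_natCast]
    exact List.getElem?_eq_getElem h1
  rw [this]
  simpa using pvLoopA_eq_runScan (parts[1].toList) [] [] (by simp)
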